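-- pv_equiv track=rewrite | github.com/python/pyperformance | performance/run.py | _ExpandBenchmarkName
-- ===== SOURCE A (Python) =====
-- def _ExpandBenchmarkName(bm_name, bench_groups):
--     """Recursively expand name benchmark names.
--
--     Args:
--         bm_name: string naming a benchmark or benchmark group.
--
--     Yields:
--         Names of actual benchmarks, with all group names fully expanded.
--     """
--     expansion = bench_groups.get(bm_name)
--     if expansion:
--         for name in expansion:
--             for name in _ExpandBenchmarkName(name, bench_groups):
--                 yield name
--     else:
--         yield bm_name
-- ===== SOURCE B (Python) =====
-- def _ExpandBenchmarkName(bm_name, bench_groups):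
--     """Iterative DFS with an explicit stack instead of recursion."""
--     stack = [bm_name]
--     while stack:
--         name = stack.pop()
--         expansion = bench_groups.get(name)
--         if expansion:
--             stack.extend(reversed(expansion))
--         else:
--             yield name
-- ===== Notes on version B (the rewrite author's own statement) =====
-- stated objective: alternative
-- what changed: Replaced A's recursive generator with an iterative explicit-stack DFS (pop a name; if it names a non-empty group push its members reversed, else yield it), removing the nested recursive generators while producing the same pre-order leaf sequence.
import Mathlib
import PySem

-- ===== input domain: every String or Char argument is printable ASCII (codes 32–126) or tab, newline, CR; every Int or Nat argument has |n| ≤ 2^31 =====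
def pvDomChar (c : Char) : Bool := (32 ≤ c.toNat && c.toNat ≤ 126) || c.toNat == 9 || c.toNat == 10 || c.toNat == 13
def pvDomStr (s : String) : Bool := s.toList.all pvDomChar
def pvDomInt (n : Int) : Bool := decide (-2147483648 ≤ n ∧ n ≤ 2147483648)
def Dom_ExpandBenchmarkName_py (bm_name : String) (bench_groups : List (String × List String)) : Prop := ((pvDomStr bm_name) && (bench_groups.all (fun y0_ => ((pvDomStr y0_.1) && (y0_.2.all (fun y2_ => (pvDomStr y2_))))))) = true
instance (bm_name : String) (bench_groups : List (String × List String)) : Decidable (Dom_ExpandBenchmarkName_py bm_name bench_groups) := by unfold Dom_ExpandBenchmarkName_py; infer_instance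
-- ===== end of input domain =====

-- B replaces A's recursive generator by an iterative explicit-stack DFS (objective: alternative, same leaf order).
-- Both ports carry a fuel guard that only makes the same computation total; on Pre_ inputs the fuel never runs out.

-- ===== PORT A =====
-- bench_groups.get(name): first-match association-list lookup (PySem.Dict semantics)
def pvGet (bench_groups : List (String × List String)) (k : String) : Option (List String) :=
  (PySem.Dict.mk bench_groups).get? k

-- literal port of A's recursion; the `some (c :: cs)` branch is Python's `if expansion:`
-- (present AND nonempty = truthy); fuel bench_groups.length + 1 suffices on Pre_ inputs
def pvExpandA (fuel : Nat) (bench_groups : List (String × List String)) (k : String) : List String :=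
  match fuel with
  | 0 => []
  | fuel + 1 =>
    match pvGet bench_groups k with
    | some (c :: cs) => (c :: cs).flatMap (fun n => pvExpandA fuel bench_groups n)
    | _ => [k]

def ExpandBenchmarkName_py (bm_name : String) (bench_groups : List (String × List String)) : List String :=
  pvExpandA (bench_groups.length + 1) bench_groups bm_name

-- ===== PORT B =====
-- size of the DFS tree below k (depth-bounded); used only as the loop's fuel bound
def pvWeight (fuel : Nat) (bench_groups : List (String × List String)) (k : String) : Nat :=
  match fuel with
  | 0 => 1
  | fuel + 1 =>
    match pvGet bench_groups k with
    | some (c :: cs) => 1 + ((c :: cs).map (fun n => pvWeight fuel bench_groups n)).sum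
    | _ => 1

-- Source B's while-loop: the list head is the top of the stack, so pushing
-- reversed(expansion) onto the Python stack is prepending expansion here
def pvLoop (fuel : Nat) (bench_groups : List (String × List String)) (stack : List String) : List String :=
  match fuel, stack with
  | _, [] => []
  | 0, _ :: _ => []
  | fuel + 1, k :: rest =>
    match pvGet bench_groups k with
    | some (c :: cs) => pvLoop fuel bench_groups ((c :: cs) ++ rest)
    | _ => k :: pvLoop fuel bench_groups rest

def ExpandBenchmarkName_py_alt (bm_name : String) (bench_groups : List (String × List String)) : List String :=
  pvLoop (pvWeight (bench_groups.length + 1) bench_groups bm_name) bench_groups [bm_name]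

-- ===== PRECONDITION & SPEC =====
-- A property of the INPUT graph only (nodes = names, edges = non-empty group entries):
-- `pvBounded n bench_groups k` says every edge chain starting at k reaches a leaf within n
-- steps. It computes no benchmark list and shares nothing with either port's computation.
def pvBounded (fuel : Nat) (bench_groups : List (String × List String)) (k : String) : Bool :=
  match fuel with
  | 0 => false
  | fuel + 1 =>
    match pvGet bench_groups k with
    | some (c :: cs) => (c :: cs).all (fun n => pvBounded fuel bench_groups n)
    | _ => true

-- Pre_: every expansion chain from bm_name ends within |bench_groups| steps — i.e. no cycle
-- of the group graph is reachable from bm_name. Exactly on the excluded inputs Python A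
-- raises RecursionError (and B loops), so Pre_ excludes nothing on which A returns.
def Pre_ExpandBenchmarkName_py (bm_name : String) (bench_groups : List (String × List String)) : Prop :=
  pvBounded (bench_groups.length + 1) bench_groups bm_name = true

instance (bm_name : String) (bench_groups : List (String × List String)) : Decidable (Pre_ExpandBenchmarkName_py bm_name bench_groups) := by unfold Pre_ExpandBenchmarkName_py; infer_instance

def pvWitness_ExpandBenchmarkName_py : String × (List (String × List String)) :=
  ("apps", [("apps", ["json", "html5lib"]), ("json", ["json_dumps", "json_loads"])])

def Spec_ExpandBenchmarkName_py (bm_name : String) (bench_groups : List (String × List String)) (out : List String) : Prop := out = ExpandBenchmarkName_py_alt bm_name bench_groups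
instance (bm_name : String) (bench_groups : List (String × List String)) (out : List String) : Decidable (Spec_ExpandBenchmarkName_py bm_name bench_groups out) := by unfold Spec_ExpandBenchmarkName_py; infer_instance

-- ===== CLAIM (what is proved, stated in full; the proofs are below) =====
def Claim_equal_ExpandBenchmarkName_py : Prop := ∀ (bm_name : String) (bench_groups : List (String × List String)), Dom_ExpandBenchmarkName_py bm_name bench_groups → Pre_ExpandBenchmarkName_py bm_name bench_groups → Spec_ExpandBenchmarkName_py bm_name bench_groups (ExpandBenchmarkName_py bm_name bench_groups)

-- ===== LEMMAS AND PROOFS =====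

-- per-case unfolding lemmas for the four fueled functions
theorem pvBounded_cons (d : Nat) (g : List (String × List String)) (k c : String)
    (cs : List String) (hg : pvGet g k = some (c :: cs)) :
    pvBounded (d + 1) g k = (c :: cs).all (fun n => pvBounded d g n) := by
  simp only [pvBounded, hg]

theorem pvExpandA_cons (d : Nat) (g : List (String × List String)) (k c : String)
    (cs : List String) (hg : pvGet g k = some (c :: cs)) :
    pvExpandA (d + 1) g k = (c :: cs).flatMap (fun n => pvExpandA d g n) := by
  simp only [pvExpandA, hg]

theorem pvWeight_cons (d : Nat) (g : List (String × List String)) (k c : String)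
    (cs : List String) (hg : pvGet g k = some (c :: cs)) :
    pvWeight (d + 1) g k = 1 + ((c :: cs).map (fun n => pvWeight d g n)).sum := by
  simp only [pvWeight, hg]

theorem pvLoop_cons (f : Nat) (g : List (String × List String)) (k c : String)
    (cs rest : List String) (hg : pvGet g k = some (c :: cs)) :
    pvLoop (f + 1) g (k :: rest) = pvLoop f g ((c :: cs) ++ rest) := by
  simp only [pvLoop, hg]

theorem pvBounded_mono (g : List (String × List String)) :
    ∀ (d : Nat) (k : String), pvBounded d g k = true → pvBounded (d + 1) g k = true := by
  intro d
  induction d with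
  | zero => intro k h; simp [pvBounded] at h
  | succ d ih =>
    intro k h
    cases hg : pvGet g k with
    | none => simp [pvBounded, hg]
    | some l =>
      cases l with
      | nil => simp [pvBounded, hg]
      | cons c cs =>
        rw [pvBounded_cons d g k c cs hg] at h
        rw [pvBounded_cons (d + 1) g k c cs hg]
        simp only [List.all_eq_true] at h ⊢
        intro x hx; exact ih x (h x hx)

theorem pvFlatMap_congr {α β : Type} (f h : α → List β) :
    ∀ (l : List α), (∀ x ∈ l, f x = h x) → l.flatMap f = l.flatMap h := by
  intro l
  induction l with
  | nil => intro _; rfl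
  | cons a l ih =>
    intro hc
    simp only [List.flatMap_cons]
    rw [hc a (by simp), ih (fun x hx => hc x (by simp [hx]))]

theorem pvExpandA_congr (g : List (String × List String)) :
    ∀ (d : Nat) (k : String), pvBounded d g k = true →
      pvExpandA (d + 1) g k = pvExpandA d g k := by
  intro d
  induction d with
  | zero => intro k h; simp [pvBounded] at h
  | succ d ih =>
    intro k h
    cases hg : pvGet g k with
    | none => simp [pvExpandA, hg]
    | some l =>
      cases l with
      | nil => simp [pvExpandA, hg]
      | cons c cs =>
        rw [pvBounded_cons d g k c cs hg] at h
        simp only [List.all_eq_true] at h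
        rw [pvExpandA_cons (d + 1) g k c cs hg, pvExpandA_cons d g k c cs hg]
        exact pvFlatMap_congr _ _ _ (fun x hx => ih x (h x hx))

theorem pvWeight_congr (g : List (String × List String)) :
    ∀ (d : Nat) (k : String), pvBounded d g k = true →
      pvWeight (d + 1) g k = pvWeight d g k := by
  intro d
  induction d with
  | zero => intro k h; simp [pvBounded] at h
  | succ d ih =>
    intro k h
    cases hg : pvGet g k with
    | none => simp [pvWeight, hg]
    | some l =>
      cases l with
      | nil => simp [pvWeight, hg]
      | cons c cs =>
        rw [pvBounded_cons d g k c cs hg] at h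
        simp only [List.all_eq_true] at h
        rw [pvWeight_cons (d + 1) g k c cs hg, pvWeight_cons d g k c cs hg]
        congr 1
        exact congrArg List.sum (List.map_congr_left (fun x hx => ih x (h x hx)))

theorem pvWeight_pos (g : List (String × List String)) (d : Nat) (k : String) :
    1 ≤ pvWeight d g k := by
  cases d with
  | zero => simp [pvWeight]
  | succ d =>
    simp only [pvWeight]
    cases pvGet g k with
    | none => simp
    | some l => cases l with
      | nil => simp
      | cons c cs => simp only []; omega

theorem pvLoop_eq_flatMap (g : List (String × List String)) (d : Nat) :
    ∀ (f : Nat) (stack : List String),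
      (∀ k ∈ stack, pvBounded d g k = true) →
      (stack.map (pvWeight d g)).sum ≤ f →
      pvLoop f g stack = stack.flatMap (pvExpandA d g) := by
  intro f
  induction f with
  | zero =>
    intro stack hb hs
    cases stack with
    | nil => rfl
    | cons k rest =>
      exfalso
      have := pvWeight_pos g d k
      simp only [List.map_cons, List.sum_cons] at hs
      omega
  | succ f ih =>
    intro stack hb hs
    cases stack with
    | nil => rfl
    | cons k rest =>
      have hbk : pvBounded d g k = true := hb k (by simp)
      cases d with
      | zero => simp [pvBounded] at hbk
      | succ d' =>
        simp only [List.map_cons, List.sum_cons] at hs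
        have hwpos := pvWeight_pos g (d' + 1) k
        have hrest_b : ∀ x ∈ rest, pvBounded (d' + 1) g x = true :=
          fun x hx => hb x (by simp [hx])
        cases hg : pvGet g k with
        | none =>
          have : pvLoop (f + 1) g (k :: rest) = k :: pvLoop f g rest := by
            simp only [pvLoop, hg]
          rw [this, ih rest hrest_b (by omega)]
          simp only [List.flatMap_cons]
          have : pvExpandA (d' + 1) g k = [k] := by simp [pvExpandA, hg]
          rw [this, List.singleton_append]
        | some l =>
          cases l with
          | nil =>
            have : pvLoop (f + 1) g (k :: rest) = k :: pvLoop f g rest := by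
              simp only [pvLoop, hg]
            rw [this, ih rest hrest_b (by omega)]
            simp only [List.flatMap_cons]
            have : pvExpandA (d' + 1) g k = [k] := by simp [pvExpandA, hg]
            rw [this, List.singleton_append]
          | cons c cs =>
            rw [pvBounded_cons d' g k c cs hg] at hbk
            simp only [List.all_eq_true] at hbk
            have hbc : ∀ x ∈ c :: cs, pvBounded (d' + 1) g x = true :=
              fun x hx => pvBounded_mono g d' x (hbk x hx)
            have hwk : pvWeight (d' + 1) g k
                = 1 + (((c :: cs)).map (pvWeight (d' + 1) g)).sum := by
              rw [pvWeight_cons d' g k c cs hg]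
              exact congrArg (1 + ·) (congrArg List.sum
                (List.map_congr_left
                  (fun x hx => (pvWeight_congr g d' x (hbk x hx)).symm)))
            have hsum : (((c :: cs) ++ rest).map (pvWeight (d' + 1) g)).sum ≤ f := by
              rw [List.map_append, List.sum_append]; omega
            have hball : ∀ x ∈ (c :: cs) ++ rest, pvBounded (d' + 1) g x = true := by
              intro x hx
              rcases List.mem_append.mp hx with h1 | h2
              · exact hbc x h1
              · exact hrest_b x h2
            have hk_expand : pvExpandA (d' + 1) g k
                = (c :: cs).flatMap (pvExpandA (d' + 1) g) := by
              rw [pvExpandA_cons d' g k c cs hg]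
              exact pvFlatMap_congr _ _ _
                (fun x hx => (pvExpandA_congr g d' x (hbk x hx)).symm)
            rw [pvLoop_cons f g k c cs rest hg, ih _ hball hsum, List.flatMap_append,
              ← hk_expand]
            exact (List.flatMap_cons ..).symm

-- ===== VERDICT (by name: the statement is the Claim_ definition above) =====
theorem ExpandBenchmarkName_py_spec : Claim_equal_ExpandBenchmarkName_py := by
  intro bm_name bench_groups _ hpre
  unfold Spec_ExpandBenchmarkName_py ExpandBenchmarkName_py ExpandBenchmarkName_py_alt
  rw [pvLoop_eq_flatMap bench_groups (bench_groups.length + 1)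
    (pvWeight (bench_groups.length + 1) bench_groups bm_name) [bm_name]
    (by intro k hk; simp only [List.mem_singleton] at hk; subst hk; exact hpre)
    (by simp)]
  simp
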